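-- pv_equiv track=rewrite | github.com/N4ache/tablero-ajedrez | index.py | es_posible_pintar_tablero
-- ===== SOURCE A (Python) =====
-- def es_posible_pintar_tablero(n):
--
--     #creamos un tablero de 'n x n' donde todas las celdas esten inicialmente en '0'
--     tablero = [[0 for _ in range(n)] for _ in range(n)]
--
--     #pintamos el tablero pintando las primeras celdas de la fila con '1'
--     for i in range(n):
--         tablero[i][:i] = [1] * i
--
--     #calculamos cuantas celdas pintadas hay en cada columna donde el resultado es una lista 'conteos_columnas'
--     conteos_columnas = [sum(tablero[fila][col] for fila in range(n)) for col in range(n)]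
--
--     #verificamos que todos los valores de la lista son unicos, los elementos repetidos se eliminan
--     if len(set(conteos_columnas)) != n:
--
--         #si el numero de elementos unicos no coincide con 'n' devuelve 'false'
--         return False
--
--     #si todos los valores son unicos devuelve 'true'
--     return True
-- ===== SOURCE B (Python) =====
-- def es_posible_pintar_tablero(n):
--     # The painted board's column counts are always pairwise distinct
--     # (they descend by one), so the check reduces to a closed form:
--     # a valid board exists exactly for non-negative sizes.
--     return n >= 0
-- ===== Notes on version B (the rewrite author's own statement) =====
-- stated objective: faster
-- what changed: Replaced the quadratic board construction and column-count uniqueness check by a closed-form sign test, since the column counts strictly decrease and hence are always distinct.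
import Mathlib
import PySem

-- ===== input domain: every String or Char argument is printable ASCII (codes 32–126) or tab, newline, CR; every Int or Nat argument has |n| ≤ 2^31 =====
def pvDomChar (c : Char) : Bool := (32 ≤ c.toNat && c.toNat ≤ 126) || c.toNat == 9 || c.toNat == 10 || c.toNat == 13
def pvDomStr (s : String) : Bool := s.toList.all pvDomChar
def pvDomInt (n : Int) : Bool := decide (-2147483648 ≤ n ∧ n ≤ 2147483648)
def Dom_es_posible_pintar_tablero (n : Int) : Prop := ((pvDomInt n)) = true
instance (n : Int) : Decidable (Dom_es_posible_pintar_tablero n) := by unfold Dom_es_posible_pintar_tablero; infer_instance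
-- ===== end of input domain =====

-- B replaces A's quadratic board construction and uniqueness check by a closed-form sign test (the column counts strictly decrease, hence are always distinct).

-- ===== PORT A =====
def es_posible_pintar_tablero (n : Int) : Bool :=
  let tablero : List (List Int) :=
    (PySem.List.pyRange 0 n 1).map (fun _ => (PySem.List.pyRange 0 n 1).map (fun _ => (0:Int)))
  -- slice assignment tablero[i][:i] = [1]*i, ported by hand: exact here since every i from range(n)
  -- satisfies 0 ≤ i < len(tablero) = len(tablero[i]), so pyGetD/pySetD never hit their defaults
  let tablero := (PySem.List.pyRange 0 n 1).foldl
    (fun t i =>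
      PySem.List.pySetD t i
        (PySem.List.pyRepeat [(1:Int)] i ++
          PySem.List.slice (PySem.List.pyGetD t i []) (some i) none)) tablero
  let conteos : List Int := (PySem.List.pyRange 0 n 1).map (fun col =>
    ((PySem.List.pyRange 0 n 1).map (fun fila =>
      PySem.List.pyGetD (PySem.List.pyGetD tablero fila []) col 0)).sum)
  if PySem.Set.len (PySem.Set.ofList conteos) ≠ n then false else true

-- ===== PORT B =====
def es_posible_pintar_tablero_alt (n : Int) : Bool :=
  decide (0 ≤ n)

-- ===== PRECONDITION & SPEC =====
def Spec_es_posible_pintar_tablero (n : Int) (out : Bool) : Prop := out = es_posible_pintar_tablero_alt n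
instance (n : Int) (out : Bool) : Decidable (Spec_es_posible_pintar_tablero n out) := by unfold Spec_es_posible_pintar_tablero; infer_instance

-- ===== CLAIM (what is proved, stated in full; the proofs are below) =====
def Claim_equal_es_posible_pintar_tablero : Prop := ∀ (n : Int), Dom_es_posible_pintar_tablero n → Spec_es_posible_pintar_tablero n (es_posible_pintar_tablero n)

-- ===== LEMMAS AND PROOFS =====

-- a fold of List.set at indices avoiding j leaves position j unchanged
theorem pvFoldlSetUntouched {α : Type} (h : Nat → List α → α) (is : List Nat)
    (t0 : List α) (j : Nat) (hj : j ∉ is) :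
    ((is.foldl (fun t i => t.set i (h i t)) t0)[j]?) = t0[j]? := by
  induction is generalizing t0 with
  | nil => rfl
  | cons i rest ih =>
    simp only [List.foldl_cons]
    rw [ih _ (by simp at hj; exact hj.2)]
    exact List.getElem?_set_ne (by simp at hj; omega)

theorem pvFoldlSetLength {α : Type} (h : Nat → List α → α) (is : List Nat) (t0 : List α) :
    (is.foldl (fun t i => t.set i (h i t)) t0).length = t0.length := by
  induction is generalizing t0 with
  | nil => rfl
  | cons i rest ih => simp [List.foldl_cons, ih]

-- a fold of List.set at indices 0,…,m-1, each new value computed from the old one at the same index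
theorem pvFoldlSetRange {α : Type} (g : Nat → α → α) (d : α) (m : Nat) (t0 : List α)
    (hlen : m ≤ t0.length) (j : Nat) (hj : j < m) :
    (((List.range m).foldl (fun t i => t.set i (g i (t.getD i d))) t0)[j]?) =
      some (g j (t0.getD j d)) := by
  induction m with
  | zero => omega
  | succ m ih =>
    rw [List.range_succ, List.foldl_append]
    simp only [List.foldl_cons, List.foldl_nil]
    set F := (List.range m).foldl (fun t i => t.set i (g i (t.getD i d))) t0 with hF
    have hFlen : F.length = t0.length := pvFoldlSetLength _ _ _
    by_cases hjm : j < m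
    · rw [List.getElem?_set_ne (by omega)]
      exact ih (by omega) hjm
    · have hjeq : j = m := by omega
      subst hjeq
      have hFj : F[j]? = t0[j]? := pvFoldlSetUntouched _ _ _ _ (by simp)
      rw [List.getElem?_set_self (by omega)]
      have : F.getD j d = t0.getD j d := by
        simp [List.getD_eq_getElem?_getD, hFj]
      rw [this]

theorem pvCountRangeGt (m col : Nat) :
    (List.range m).countP (fun x => decide (col < x)) = m - (col + 1) := by
  induction m with
  | zero => simp
  | succ m ih =>
    rw [List.range_succ, List.countP_append]
    simp only [List.countP_cons, List.countP_nil]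
    by_cases h : col < m
    · simp [h, ih]; omega
    · simp [h, ih]; omega

-- element col of row fila = [1]*fila ++ [0]*(m-fila)
theorem pvRowElem (m fila col : Nat) (hcol : col < m) (hfila : fila ≤ m) :
    (List.replicate fila (1:Int) ++ List.replicate (m - fila) (0:Int)).getD col 0 =
      if col < fila then (1:Int) else 0 := by
  by_cases h : col < fila
  · rw [List.getD_eq_getElem?_getD, List.getElem?_append_left (by simpa using h)]
    simp [h]
  · rw [List.getD_eq_getElem?_getD, List.getElem?_append_right (by simp; omega)]
    simp only [List.length_replicate, List.getElem?_replicate]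
    have : col - fila < m - fila := by omega
    simp [this, h]

theorem pvSumIte (l : List Nat) (col : Nat) :
    (l.map (fun fila => if col < fila then (1:Int) else 0)).sum =
      (l.countP (fun fila => decide (col < fila)) : Int) := by
  induction l with
  | nil => simp
  | cons a t ih =>
    simp only [List.map_cons, List.sum_cons, List.countP_cons, ih]
    by_cases h : col < a <;> simp [h] <;> omega

-- main computation for n = (m : Nat): A returns true
theorem pvMain (m : Nat) : es_posible_pintar_tablero (m : Int) = true := by
  unfold es_posible_pintar_tablero
  rw [PySem.List.pyRange_zero_natCast]
  -- normalize the step function to Nat operations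
  have hstep : ∀ (t : List (List Int)) (k : Nat),
      PySem.List.pySetD t (k : Int)
        (PySem.List.pyRepeat [(1:Int)] (k : Int) ++
          PySem.List.slice (PySem.List.pyGetD t (k : Int) []) (some (k : Int)) none) =
      t.set k (List.replicate k (1:Int) ++ (t.getD k []).drop k) := by
    intro t k
    rw [PySem.List.pySetD_natCast, PySem.List.pyRepeat_singleton,
        PySem.List.slice_from_natCast, PySem.List.pyGetD_natCast]
    simp
  simp only [List.foldl_map, List.map_map, Function.comp_def, hstep, List.map_const',
    List.length_range]
  have hrow : ∀ fila : Nat, fila < m →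
      PySem.List.pyGetD
        ((List.range m).foldl
          (fun t k => t.set k (List.replicate k (1:Int) ++ (t.getD k []).drop k))
          (List.replicate m (List.replicate m (0:Int)))) (fila : Int) [] =
        List.replicate fila (1:Int) ++ List.replicate (m - fila) (0:Int) := by
    intro fila hf
    rw [PySem.List.pyGetD_natCast, List.getD_eq_getElem?_getD,
        pvFoldlSetRange (fun k r => List.replicate k (1:Int) ++ r.drop k) []
          m _ (by simp) fila hf]
    simp [List.getD_eq_getElem?_getD, hf, List.drop_replicate]
  have hconteos : ∀ col ∈ List.range m,
      ((List.range m).map (fun fila : Nat =>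
        PySem.List.pyGetD
          (PySem.List.pyGetD
            ((List.range m).foldl
              (fun t k => t.set k (List.replicate k (1:Int) ++ (t.getD k []).drop k))
              (List.replicate m (List.replicate m (0:Int)))) (fila : Int) [])
          (col : Int) 0)).sum = ((m - (col + 1) : Nat) : Int) := by
    intro col hc
    rw [List.mem_range] at hc
    have hinner : ∀ fila ∈ List.range m,
        PySem.List.pyGetD
          (PySem.List.pyGetD
            ((List.range m).foldl
              (fun t k => t.set k (List.replicate k (1:Int) ++ (t.getD k []).drop k))
              (List.replicate m (List.replicate m (0:Int)))) (fila : Int) [])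
          (col : Int) 0 = (if col < fila then (1:Int) else 0) := by
      intro fila hf
      rw [List.mem_range] at hf
      rw [hrow fila hf, PySem.List.pyGetD_natCast,
          pvRowElem m fila col hc (by omega)]
    rw [List.map_congr_left hinner, pvSumIte, pvCountRangeGt]
  rw [List.map_congr_left hconteos]
  have hnodup : ((List.range m).map (fun col => ((m - (col + 1) : Nat) : Int))).Nodup := by
    refine List.Nodup.map_on ?_ (List.nodup_range)
    intro x hx y hy hxy
    rw [List.mem_range] at hx hy
    have : m - (x + 1) = m - (y + 1) := by exact_mod_cast hxy
    omega
  rw [PySem.Set.ofList_eq_self_of_nodup _ hnodup]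
  simp [PySem.Set.len]

-- ===== VERDICT (by name: the statement is the Claim_ definition above) =====
theorem es_posible_pintar_tablero_spec : Claim_equal_es_posible_pintar_tablero := by
  intro n _
  unfold Spec_es_posible_pintar_tablero es_posible_pintar_tablero_alt
  by_cases hn : 0 ≤ n
  · obtain ⟨m, rfl⟩ := Int.eq_ofNat_of_zero_le hn
    simp [pvMain, hn]
  · -- n < 0: empty ranges, conteos = [], len(set) = 0 ≠ n
    unfold es_posible_pintar_tablero
    rw [PySem.List.pyRange_one_eq_nil (by omega)]
    simp [PySem.Set.len, PySem.Set.ofList, hn]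
    omega
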